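-- pv_equiv track=rewrite | github.com/MOMOKO606/CLRS_Code_in_Python | chapter_8.py | counting_sort4mat
-- ===== SOURCE A (Python) =====
-- def counting_sort4mat( matrix, r ):
--
--     #  Get the rows of matrix.
--     n = len(matrix)
--     #  Get the columns of matrix.
--     d = len(matrix[0])
--
--     #  set the kth digits of the matrix as list A.
--     A = [matrix[i][r] for i in range(n)]
--
--     #  Get the range of A.
--     k = max(A)
--     #  Initialize the empty auxiliary lists by size.
--     C = [0] * (k + 1)
--     B = [[0 for i in range(d)] for j in range(n)]
--
--     #  counting the times each element in A appears.
--     for i in range(n):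
--         C[A[i]] += 1
--     #  Accumulate the counting.
--     for i in range(1, k + 1):
--         C[i] += C[i - 1]
--     #  The value in C now represents the sorted position of its index.
--     #  I know it's a bit silly and tricky, the indices of C now represents the original value in A.
--     #  So now we go through A to check every element and its related sorted position.
--     #  We go through A from right to left since we want the algorithm to be stable.
--     for i in range(n - 1, -1, -1):
--         B[C[A[i]] - 1] = matrix[i]
--         #  Update the index.
--         C[A[i]] -= 1
--     return B
-- ===== SOURCE B (Python) =====
-- def counting_sort4mat(matrix, r):
--     #  Single forward pass into per-key buckets (stable), then concatenate.
--     k = max(row[r] for row in matrix)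
--     buckets = [[] for _ in range(k + 1)]
--     for row in matrix:
--         buckets[row[r]].append(row)
--     return [row for bucket in buckets for row in bucket]
-- ===== Notes on version B (the rewrite author's own statement) =====
-- stated objective: faster
-- what changed: Replaces A's three index-driven passes (count array, prefix sums, reverse placement into a preallocated zero matrix) by one forward pass appending each row to a per-key bucket list and concatenating the buckets, which is stable without any counter arithmetic.
import Mathlib
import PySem

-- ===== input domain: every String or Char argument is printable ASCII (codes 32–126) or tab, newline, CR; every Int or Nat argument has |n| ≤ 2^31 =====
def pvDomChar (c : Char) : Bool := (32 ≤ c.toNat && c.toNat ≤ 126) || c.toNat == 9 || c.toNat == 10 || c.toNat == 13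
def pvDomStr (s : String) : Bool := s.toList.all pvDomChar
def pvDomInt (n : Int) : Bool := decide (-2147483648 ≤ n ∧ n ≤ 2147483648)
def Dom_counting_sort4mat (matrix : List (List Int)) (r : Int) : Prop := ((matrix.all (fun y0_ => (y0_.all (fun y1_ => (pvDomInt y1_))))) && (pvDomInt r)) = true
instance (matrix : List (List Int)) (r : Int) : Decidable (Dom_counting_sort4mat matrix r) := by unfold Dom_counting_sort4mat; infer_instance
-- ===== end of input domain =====

-- B replaces A's three index-driven passes (counts, prefix sums, reverse placement into a
-- preallocated zero matrix) by one forward pass into per-key buckets plus a concatenation.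


-- ===== PORT A =====
def counting_sort4mat (matrix : List (List Int)) (r : Int) : List (List Int) :=
  let n : Int := matrix.length
  let d : Int := (PySem.List.pyGetD matrix 0 []).length
  let A : List Int := (PySem.List.pyRange 0 n 1).map
    (fun i => PySem.List.pyGetD (PySem.List.pyGetD matrix i []) r 0)
  let k : Int := match PySem.List.max? A (fun x => x) with
    | some m => m
    | none => 0                      -- max([]) raises ValueError: excluded by Pre_
  let C0 : List Int := List.replicate (k + 1).toNat 0
  let B0 : List (List Int) := (PySem.List.pyRange 0 n 1).map
    (fun _ => (PySem.List.pyRange 0 d 1).map (fun _ => (0 : Int)))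
  let C1 := (PySem.List.pyRange 0 n 1).foldl (fun C i =>
    let a := PySem.List.pyGetD A i 0
    PySem.List.pySetD C a (PySem.List.pyGetD C a 0 + 1)) C0
  let C2 := (PySem.List.pyRange 1 (k + 1) 1).foldl (fun C i =>
    PySem.List.pySetD C i (PySem.List.pyGetD C i 0 + PySem.List.pyGetD C (i - 1) 0)) C1
  let BC := (PySem.List.pyRange (n - 1) (-1) (-1)).foldl
    (fun (BC : List (List Int) × List Int) i =>
      let a := PySem.List.pyGetD A i 0
      let B' := PySem.List.pySetD BC.1 (PySem.List.pyGetD BC.2 a 0 - 1)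
                  (PySem.List.pyGetD matrix i [])
      let C' := PySem.List.pySetD BC.2 a (PySem.List.pyGetD BC.2 a 0 - 1)
      (B', C')) (B0, C2)
  BC.1

-- ===== PORT B =====
def counting_sort4mat_alt (matrix : List (List Int)) (r : Int) : List (List Int) :=
  let k : Int := match PySem.List.max? (matrix.map (fun row => PySem.List.pyGetD row r 0)) (fun x => x) with
    | some m => m
    | none => 0                      -- max of empty generator raises ValueError: excluded by Pre_
  let buckets0 : List (List (List Int)) := (PySem.List.pyRange 0 (k + 1) 1).map (fun _ => [])
  let buckets := matrix.foldl (fun bs row =>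
    let key := PySem.List.pyGetD row r 0
    PySem.List.pySetD bs key (PySem.List.pyGetD bs key [] ++ [row])) buckets0
  buckets.flatten

-- ===== PRECONDITION & SPEC =====
-- Pre_ holds exactly on the inputs where A returns: it excludes the empty matrix and column
-- indices r out of range for some row (IndexError), and matrices containing a key in column r
-- below -(max key + 1), where the access into the count table raises IndexError.
def Pre_counting_sort4mat (matrix : List (List Int)) (r : Int) : Prop :=
  matrix ≠ [] ∧ (∀ row ∈ matrix, PySem.Raise.InRange row.length r) ∧
    ∀ row ∈ matrix, ∃ row' ∈ matrix,
      -(PySem.List.pyGetD row' r 0 + 1) ≤ PySem.List.pyGetD row r 0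
instance (matrix : List (List Int)) (r : Int) : Decidable (Pre_counting_sort4mat matrix r) := by
  unfold Pre_counting_sort4mat; infer_instance

def pvWitness_counting_sort4mat : List (List Int) × Int := ([[1, 5], [0, 3], [1, 2]], 0)

def Spec_counting_sort4mat (matrix : List (List Int)) (r : Int) (out : List (List Int)) : Prop := out = counting_sort4mat_alt matrix r
instance (matrix : List (List Int)) (r : Int) (out : List (List Int)) : Decidable (Spec_counting_sort4mat matrix r out) := by unfold Spec_counting_sort4mat; infer_instance

-- ===== CLAIM (what is proved, stated in full; the proofs are below) =====
def Claim_equal_counting_sort4mat : Prop := ∀ (matrix : List (List Int)) (r : Int), Dom_counting_sort4mat matrix r → Pre_counting_sort4mat matrix r → Spec_counting_sort4mat matrix r (counting_sort4mat matrix r)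

-- ===== LEMMAS AND PROOFS =====

-- the key of a row, as both ports read it
def keyf (r : Int) (row : List Int) : Int := PySem.List.pyGetD row r 0

-- buckets for an arbitrary key function g
def bucketsOf (m : Int) (g : List Int → Int) (matrix : List (List Int)) : List (List Int) :=
  (PySem.List.pyRange 0 m 1).flatMap (fun v => matrix.filter (fun row => decide (g row = v)))

-- Python's index normalisation for an in-range, possibly negative, index into a table of size m
def wk (m x : Int) : Int := if x < 0 then x + m else x

def cle (K : List Int) (v : Int) : Nat := K.countP (fun x => decide (x ≤ v))
def clt (K : List Int) (v : Int) : Nat := K.countP (fun x => decide (x < v))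
def ceq (K : List Int) (v : Int) : Nat := K.countP (fun x => decide (x = v))

-- workhorse: a countP split over a disjoint disjunction
theorem countP_or_disjoint {α : Type} (l : List α) (p q s : α → Bool)
    (h : ∀ x ∈ l, (s x = true ↔ (p x = true ∨ q x = true)) ∧ ¬(p x = true ∧ q x = true)) :
    l.countP s = l.countP p + l.countP q := by
  induction l with
  | nil => simp
  | cons a t ih =>
    have ha := h a (by simp)
    have ht := ih (fun x hx => h x (by simp [hx]))
    simp only [List.countP_cons, ht]
    by_cases hp : p a = true <;> by_cases hq : q a = true <;>
      simp_all <;> omega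

theorem cle_eq_clt_add_ceq (K : List Int) (v : Int) : cle K v = clt K v + ceq K v := by
  apply countP_or_disjoint
  intro x _
  constructor
  · simp; omega
  · simp; omega

theorem cle_split (K : List Int) (v : Int) : cle K v = cle K (v - 1) + ceq K v := by
  apply countP_or_disjoint
  intro x _
  constructor
  · simp; omega
  · simp; omega

theorem cle_le_clt (K : List Int) (v w : Int) (h : v < w) : cle K v ≤ clt K w := by
  apply List.countP_mono_left
  intro x _ hx
  simp at hx ⊢; omega

theorem cle_le_length (K : List Int) (v : Int) : cle K v ≤ K.length :=
  List.countP_le_length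

theorem ceq_take_succ (K : List Int) (i : Nat) (hi : i < K.length) (v : Int) :
    ceq (K.take (i + 1)) v = ceq (K.take i) v + (if K[i] = v then 1 else 0) := by
  rw [List.take_succ, List.getElem?_eq_getElem hi]
  simp only [ceq, List.countP_append, List.countP_cons, List.countP_nil]
  split_ifs with h <;> simp [h]

theorem cle_take_succ (K : List Int) (i : Nat) (hi : i < K.length) (v : Int) :
    cle (K.take (i + 1)) v = cle (K.take i) v + (if K[i] ≤ v then 1 else 0) := by
  rw [List.take_succ, List.getElem?_eq_getElem hi]
  simp only [cle, List.countP_append, List.countP_cons, List.countP_nil]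
  split_ifs with h <;> simp [h]

theorem clt_drop_cons (K : List Int) (i : Nat) (hi : i < K.length) (v : Int) :
    clt (K.drop i) v = (if K[i] < v then 1 else 0) + clt (K.drop (i + 1)) v := by
  rw [List.drop_eq_getElem_cons hi]
  simp only [clt, List.countP_cons]
  by_cases h : K[i] < v <;> simp [h] <;> omega

theorem clt_take_drop (K : List Int) (m : Nat) (v : Int) :
    clt K v = clt (K.take m) v + clt (K.drop m) v := by
  conv_lhs => rw [← List.take_append_drop m K]
  simp only [clt, List.countP_append]

theorem ceq_take_le (K : List Int) (i j : Nat) (hij : i ≤ j) (v : Int) :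
    ceq (K.take i) v ≤ ceq (K.take j) v := by
  have : K.take j = K.take i ++ (K.drop i).take (j - i) := by
    rw [← List.take_add]; congr 1; omega
  rw [this]; simp [ceq, List.countP_append]

theorem ceq_take_lt (K : List Int) (i : Nat) (hi : i < K.length) :
    ceq (K.take i) K[i] < ceq K K[i] := by
  have h1 : ceq (K.take (i+1)) K[i] = ceq (K.take i) K[i] + 1 := by
    rw [ceq_take_succ K i hi]; simp
  have h2 : ceq (K.take (i+1)) K[i] ≤ ceq K K[i] := by
    simpa using ceq_take_le K (i+1) K.length (by omega) K[i]
  omega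

-- setting entry a of a table indexed by pyRange 0 m 1
theorem setMapRange {α : Type} (f : Int → α) (m a : Int) (v : α) (h0 : 0 ≤ a) (h1 : a < m) :
    PySem.List.pySetD ((PySem.List.pyRange 0 m 1).map f) a v
      = (PySem.List.pyRange 0 m 1).map (fun x => if x = a then v else f x) := by
  rw [PySem.List.pySetD_of_nonneg _ v h0]
  apply List.ext_getElem
  · simp
  · intro j hj hj'
    simp only [List.getElem_set, List.getElem_map]
    rw [PySem.List.getElem_pyRange_one]
    split_ifs <;> (try rfl) <;> (exfalso; omega)


theorem pySetD_neg {α : Type} (xs : List α) (k : Nat) (v : α) (h0 : 0 < k) (h1 : k ≤ xs.length) :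
    PySem.List.pySetD xs (-(k:Int)) v = xs.set (xs.length - k) v := by
  unfold PySem.List.pySetD PySem.List.pySet? PySem.List.pyIdx?
  split_ifs with ha hb hc
  · omega
  · omega
  · simp only [Option.map_some, Option.getD_some]
    congr 1
    omega
  · omega

-- reading a range-map table at a possibly negative in-range index
theorem getMapRangeWrap {α : Type} (f : Int → α) (m a : Int) (d : α)
    (h1 : -m ≤ a) (h2 : a < m) :
    PySem.List.pyGetD ((PySem.List.pyRange 0 m 1).map f) a d = f (wk m a) := by
  by_cases h : 0 ≤ a
  · rw [wk, if_neg (by omega)]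
    exact PySem.List.pyGetD_map_pyRange_of_nonneg f m a d h h2
  · rw [wk, if_pos (by omega)]
    have hlen : ((PySem.List.pyRange 0 m 1).map f).length = m.toNat := by
      simp [PySem.List.length_pyRange_one]
    have hget := PySem.List.pyGetD_neg_natCast ((PySem.List.pyRange 0 m 1).map f)
      ((-a).toNat) d (by omega) (by omega)
    rw [show a = -(((-a).toNat : Nat) : Int) by omega, hget, List.getElem_map,
      PySem.List.getElem_pyRange_one]
    congr 1
    rw [hlen] at *
    omega

-- writing a range-map table at a possibly negative in-range index
theorem setMapRangeWrap {α : Type} (f : Int → α) (m a : Int) (v : α)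
    (h1 : -m ≤ a) (h2 : a < m) :
    PySem.List.pySetD ((PySem.List.pyRange 0 m 1).map f) a v
      = (PySem.List.pyRange 0 m 1).map (fun x => if x = wk m a then v else f x) := by
  by_cases h : 0 ≤ a
  · rw [wk, if_neg (by omega)]
    exact setMapRange f m a v h h2
  · rw [wk, if_pos (by omega)]
    have hlen : ((PySem.List.pyRange 0 m 1).map f).length = m.toNat := by
      simp [PySem.List.length_pyRange_one]
    rw [show a = -(((-a).toNat : Nat) : Int) by omega,
      pySetD_neg _ ((-a).toNat) v (by omega) (by omega)]
    apply List.ext_getElem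
    · simp
    · intro j hj hj'
      simp only [List.getElem_set, List.getElem_map]
      rw [PySem.List.getElem_pyRange_one]
      rw [hlen] at hj
      split_ifs <;> (try rfl) <;> (exfalso; omega)

-- stage 1: the counting loop computes the multiplicity table of the normalised keys
theorem stage1 (m : Int) (P : List Int) (hP : ∀ x ∈ P, -m ≤ x ∧ x < m) :
    P.foldl (fun C a => PySem.List.pySetD C a (PySem.List.pyGetD C a 0 + 1))
        ((PySem.List.pyRange 0 m 1).map (fun _ => (0 : Int)))
      = (PySem.List.pyRange 0 m 1).map (fun v => (ceq (P.map (wk m)) v : Int)) := by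
  induction P using List.reverseRecOn with
  | nil => simp [ceq]
  | append_singleton P a ih =>
    have hPa := hP a (by simp)
    have ih' := ih (fun x hx => hP x (by simp [hx]))
    rw [List.foldl_append, ih']
    simp only [List.foldl_cons, List.foldl_nil]
    rw [getMapRangeWrap _ m a 0 hPa.1 hPa.2]
    rw [setMapRangeWrap _ m a _ hPa.1 hPa.2]
    apply List.map_congr_left
    intro x hx
    have : ceq ((P ++ [a]).map (wk m)) x = ceq (P.map (wk m)) x + (if wk m a = x then 1 else 0) := by
      simp only [List.map_append, List.map_cons, List.map_nil, ceq, List.countP_append,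
        List.countP_cons, List.countP_nil]
      by_cases h : wk m a = x <;> simp [h]
    rw [this]
    by_cases h : x = wk m a
    · subst h; simp
    · rw [if_neg h, if_neg (fun hh : wk m a = x => h hh.symm)]; simp
-- stage 2: the prefix-sum loop turns multiplicities into cumulative counts
theorem stage2 (K : List Int) (m : Int) (hK : ∀ x ∈ K, 0 ≤ x ∧ x < m)
    (j : Int) (h1 : 1 ≤ j) (hj : j ≤ m) :
    (PySem.List.pyRange 1 j 1).foldl (fun C i =>
        PySem.List.pySetD C i (PySem.List.pyGetD C i 0 + PySem.List.pyGetD C (i - 1) 0))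
        ((PySem.List.pyRange 0 m 1).map (fun v => (ceq K v : Int)))
      = (PySem.List.pyRange 0 m 1).map
          (fun v => if v < j then (cle K v : Int) else (ceq K v : Int)) := by
  induction j, h1 using Int.le_induction with
  | base =>
    rw [PySem.List.pyRange_one_eq_nil (le_refl 1)]
    simp only [List.foldl_nil]
    apply List.map_congr_left
    intro x hx
    rw [PySem.List.mem_pyRange_one] at hx
    by_cases h : x < 1
    · have hx0 : x = 0 := by omega
      subst hx0
      rw [if_pos (by omega)]
      congr 1
      apply List.countP_congr
      intro y hy
      have := hK y hy
      simp; omega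
    · rw [if_neg h]
  | succ j hj1 ih =>
    have hjm : j ≤ m := by omega
    rw [PySem.List.pyRange_one_succ_right hj1, List.foldl_append, ih hjm]
    simp only [List.foldl_cons, List.foldl_nil]
    have hj0 : (0 : Int) ≤ j := by omega
    have hjltm : j < m := by omega
    rw [PySem.List.pyGetD_map_pyRange_of_nonneg _ m j 0 hj0 hjltm]
    rw [PySem.List.pyGetD_map_pyRange_of_nonneg _ m (j - 1) 0 (by omega) (by omega)]
    rw [if_neg (lt_irrefl j), if_pos (by omega : j - 1 < j)]
    rw [setMapRange _ m j _ hj0 hjltm]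
    apply List.map_congr_left
    intro x hx
    by_cases h : x = j
    · subst h
      rw [if_pos rfl, if_pos (by omega)]
      have := cle_split K x
      push_cast [this]
      ring
    · rw [if_neg h]
      by_cases h2 : x < j
      · rw [if_pos h2, if_pos (by omega)]
      · rw [if_neg h2, if_neg (by omega)]

-- final position of row i in the sorted output
def posn (K : List Int) (i : Nat) : Nat := clt K (K.getD i 0) + ceq (K.take i) (K.getD i 0)

-- the writes the placement loop performs, processed from row m-1 down to row 0
def wrAux (matrix : List (List Int)) (K : List Int) : Nat → List (List Int) → List (List Int)
  | 0, B => B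
  | m + 1, B => wrAux matrix K m (PySem.List.pySetD B ((posn K m : Nat) : Int) (matrix.getD m []))

-- the counter table after the placement loop has processed rows m..n-1
def cmState (K : List Int) (mx : Int) (m : Nat) : List Int :=
  (PySem.List.pyRange 0 mx 1).map
    (fun v => ((cle (K.take m) v : Int) + (clt (K.drop m) v : Int)))


-- stage 3: the placement loop is the descending sequence of writes wrAux
-- (keys are read raw from K but index the counter table after Python index normalisation)
theorem stage3 (matrix : List (List Int)) (K : List Int) (mx : Int)
    (hK : ∀ x ∈ K, -mx ≤ x ∧ x < mx)
    (m : Nat) (hm : m ≤ K.length) (B : List (List Int)) :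
    ((PySem.List.pyRange ((m : Int) - 1) (-1) (-1)).foldl
      (fun (BC : List (List Int) × List Int) i =>
        (PySem.List.pySetD BC.1 (PySem.List.pyGetD BC.2 (PySem.List.pyGetD K i 0) 0 - 1)
           (PySem.List.pyGetD matrix i []),
         PySem.List.pySetD BC.2 (PySem.List.pyGetD K i 0)
           (PySem.List.pyGetD BC.2 (PySem.List.pyGetD K i 0) 0 - 1)))
      (B, cmState (K.map (wk mx)) mx m)).1 = wrAux matrix (K.map (wk mx)) m B := by
  induction m generalizing B with
  | zero =>
    rw [show ((0 : Nat) : Int) - 1 = -1 by omega, PySem.List.pyRange_neg_one_eq_nil (le_refl _)]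
    rfl
  | succ m ih =>
    have hmK : m < K.length := by omega
    have hmW : m < (K.map (wk mx)).length := by simpa using hmK
    have hKm : K.getD m 0 = K[m] := by rw [List.getD_eq_getElem _ _ hmK]
    have hWm : (K.map (wk mx))[m] = wk mx K[m] := by simp
    have hbnd := hK K[m] (List.getElem_mem hmK)
    rw [show ((m + 1 : Nat) : Int) - 1 = (m : Int) by omega]
    rw [PySem.List.pyRange_neg_one_cons (by omega : (-1 : Int) < (m : Int))]
    simp only [List.foldl_cons]
    -- the counter entry read for key K[m]
    have hread : PySem.List.pyGetD (cmState (K.map (wk mx)) mx (m + 1)) (PySem.List.pyGetD K (m : Int) 0) 0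
        = (cle ((K.map (wk mx)).take (m + 1)) (K.map (wk mx))[m] : Int)
          + (clt ((K.map (wk mx)).drop (m + 1)) (K.map (wk mx))[m] : Int) := by
      rw [PySem.List.pyGetD_natCast, hKm, cmState,
        getMapRangeWrap _ mx K[m] 0 hbnd.1 hbnd.2, hWm]
    -- the position written is posn (K.map (wk mx)) m
    have hpos : (cle ((K.map (wk mx)).take (m + 1)) (K.map (wk mx))[m] : Int)
          + (clt ((K.map (wk mx)).drop (m + 1)) (K.map (wk mx))[m] : Int) - 1
        = ((posn (K.map (wk mx)) m : Nat) : Int) := by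
      have e1 : cle ((K.map (wk mx)).take (m+1)) (K.map (wk mx))[m]
          = clt ((K.map (wk mx)).take (m+1)) (K.map (wk mx))[m]
            + ceq ((K.map (wk mx)).take (m+1)) (K.map (wk mx))[m] :=
        cle_eq_clt_add_ceq _ _
      have e2 : clt (K.map (wk mx)) (K.map (wk mx))[m]
          = clt ((K.map (wk mx)).take (m+1)) (K.map (wk mx))[m]
            + clt ((K.map (wk mx)).drop (m+1)) (K.map (wk mx))[m] :=
        clt_take_drop _ _ _
      have e3 : ceq ((K.map (wk mx)).take (m+1)) (K.map (wk mx))[m]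
          = ceq ((K.map (wk mx)).take m) (K.map (wk mx))[m] + 1 := by
        rw [ceq_take_succ (K.map (wk mx)) m hmW]; simp
      have e4 : (K.map (wk mx)).getD m 0 = (K.map (wk mx))[m] := List.getD_eq_getElem _ _ hmW
      simp only [posn, e4]
      omega
    -- the updated counter table is cmState (K.map (wk mx)) mx m
    have hupd : PySem.List.pySetD (cmState (K.map (wk mx)) mx (m + 1)) (PySem.List.pyGetD K (m : Int) 0)
        (PySem.List.pyGetD (cmState (K.map (wk mx)) mx (m + 1)) (PySem.List.pyGetD K (m : Int) 0) 0 - 1)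
        = cmState (K.map (wk mx)) mx m := by
      rw [hread, PySem.List.pyGetD_natCast, hKm]
      rw [show cmState (K.map (wk mx)) mx (m+1) = (PySem.List.pyRange 0 mx 1).map
        (fun v => ((cle ((K.map (wk mx)).take (m+1)) v : Int)
          + (clt ((K.map (wk mx)).drop (m+1)) v : Int))) from rfl]
      rw [setMapRangeWrap _ mx K[m] _ hbnd.1 hbnd.2, ← hWm]
      apply List.map_congr_left
      intro x hx
      by_cases h : x = (K.map (wk mx))[m]
      · rw [if_pos h, h]
        have e4 : cle ((K.map (wk mx)).take (m+1)) (K.map (wk mx))[m]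
            = cle ((K.map (wk mx)).take m) (K.map (wk mx))[m] + 1 := by
          rw [cle_take_succ (K.map (wk mx)) m hmW, if_pos (le_refl _)]
        have e5 : clt ((K.map (wk mx)).drop m) (K.map (wk mx))[m]
            = clt ((K.map (wk mx)).drop (m+1)) (K.map (wk mx))[m] := by
          rw [clt_drop_cons (K.map (wk mx)) m hmW, if_neg (lt_irrefl _)]
          omega
        omega
      · rw [if_neg h]
        by_cases h2 : (K.map (wk mx))[m] < x
        · have e4 : cle ((K.map (wk mx)).take (m+1)) x = cle ((K.map (wk mx)).take m) x + 1 := by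
            rw [cle_take_succ (K.map (wk mx)) m hmW, if_pos (le_of_lt h2)]
          have e5 : clt ((K.map (wk mx)).drop m) x = 1 + clt ((K.map (wk mx)).drop (m+1)) x := by
            rw [clt_drop_cons (K.map (wk mx)) m hmW, if_pos h2]
          omega
        · have e4 : cle ((K.map (wk mx)).take (m+1)) x = cle ((K.map (wk mx)).take m) x := by
            rw [cle_take_succ (K.map (wk mx)) m hmW, if_neg (by omega : ¬ (K.map (wk mx))[m] ≤ x)]
            · omega
          have e5 : clt ((K.map (wk mx)).drop m) x = clt ((K.map (wk mx)).drop (m+1)) x := by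
            rw [clt_drop_cons (K.map (wk mx)) m hmW, if_neg h2]
            omega
          omega
    rw [hupd, hread, hpos, PySem.List.pyGetD_natCast matrix m]
    simp only [wrAux]
    exact ih (by omega) _
theorem wrAux_length (matrix : List (List Int)) (K : List Int) (m : Nat) (B : List (List Int)) :
    (wrAux matrix K m B).length = B.length := by
  induction m generalizing B with
  | zero => rfl
  | succ m ih =>
    simp only [wrAux]
    rw [ih, PySem.List.pySetD_natCast, List.length_set]

theorem posn_lt (K : List Int) (i : Nat) (hi : i < K.length) : posn K i < K.length := by
  have hKi : K.getD i 0 = K[i] := List.getD_eq_getElem _ _ hi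
  have h1 := ceq_take_lt K i hi
  have h2 := cle_eq_clt_add_ceq K K[i]
  have h3 := cle_le_length K K[i]
  simp only [posn, hKi]
  omega

theorem posn_lt_posn (K : List Int) (i j : Nat) (hi : i < K.length) (hj : j < K.length)
    (hij : i < j) (hkey : K[i] ≤ K[j]) : posn K i < posn K j := by
  have hKi : K.getD i 0 = K[i] := List.getD_eq_getElem _ _ hi
  have hKj : K.getD j 0 = K[j] := List.getD_eq_getElem _ _ hj
  simp only [posn, hKi, hKj]
  rcases eq_or_lt_of_le hkey with heq | hlt
  · -- same key: ranks in the original order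
    rw [← heq]
    have h1 : ceq (K.take (i+1)) K[i] = ceq (K.take i) K[i] + 1 := by
      rw [ceq_take_succ K i hi, if_pos rfl]
    have h2 : ceq (K.take (i+1)) K[i] ≤ ceq (K.take j) K[i] := ceq_take_le K (i+1) j hij _
    omega
  · -- strictly smaller key: whole bucket of K[i] comes first
    have h1 : ceq (K.take i) K[i] < ceq K K[i] := ceq_take_lt K i hi
    have h2 : cle K K[i] = clt K K[i] + ceq K K[i] := cle_eq_clt_add_ceq _ _
    have h3 : cle K K[i] ≤ clt K K[j] := cle_le_clt K _ _ hlt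
    omega

theorem posn_ne (K : List Int) (i j : Nat) (hi : i < K.length) (hj : j < K.length)
    (hij : i ≠ j) : posn K i ≠ posn K j := by
  rcases Nat.lt_or_ge i j with h | h
  · rcases le_or_gt K[i] K[j] with hk | hk
    · exact Nat.ne_of_lt (posn_lt_posn K i j hi hj h hk)
    · -- K[j] < K[i]: bucket of K[j] lies strictly before position of row i
      have hKi : K.getD i 0 = K[i] := List.getD_eq_getElem _ _ hi
      have hKj : K.getD j 0 = K[j] := List.getD_eq_getElem _ _ hj
      have h1 : ceq (K.take j) K[j] < ceq K K[j] := ceq_take_lt K j hj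
      have h2 : cle K K[j] = clt K K[j] + ceq K K[j] := cle_eq_clt_add_ceq _ _
      have h3 : cle K K[j] ≤ clt K K[i] := cle_le_clt K _ _ hk
      simp only [posn, hKi, hKj]
      omega
  · have hji : j < i := by omega
    rcases le_or_gt K[j] K[i] with hk | hk
    · exact (Nat.ne_of_lt (posn_lt_posn K j i hj hi hji hk)).symm
    · have hKi : K.getD i 0 = K[i] := List.getD_eq_getElem _ _ hi
      have hKj : K.getD j 0 = K[j] := List.getD_eq_getElem _ _ hj
      have h1 : ceq (K.take i) K[i] < ceq K K[i] := ceq_take_lt K i hi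
      have h2 : cle K K[i] = clt K K[i] + ceq K K[i] := cle_eq_clt_add_ceq _ _
      have h3 : cle K K[i] ≤ clt K K[j] := cle_le_clt K _ _ hk
      simp only [posn, hKi, hKj]
      omega

theorem posn_surj (K : List Int) (p : Nat) (hp : p < K.length) :
    ∃ i, i < K.length ∧ posn K i = p := by
  have hinj : Function.Injective (fun i : Fin K.length => (⟨posn K i, posn_lt K i i.2⟩ : Fin K.length)) := by
    intro a b hab
    by_contra hne
    exact posn_ne K a b a.2 b.2 (fun h => hne (Fin.ext h)) (congrArg Fin.val hab)
  have hsurj := Finite.surjective_of_injective hinj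
  obtain ⟨i, hi⟩ := hsurj ⟨p, hp⟩
  exact ⟨i, i.2, congrArg Fin.val hi⟩

theorem wrAux_getElem?_ne (matrix : List (List Int)) (K : List Int) (m : Nat)
    (B : List (List Int)) (p : Nat) (h : ∀ i, i < m → posn K i ≠ p) :
    (wrAux matrix K m B)[p]? = B[p]? := by
  induction m generalizing B with
  | zero => rfl
  | succ m ih =>
    simp only [wrAux]
    rw [ih _ (fun i hi => h i (by omega)), PySem.List.pySetD_natCast, List.getElem?_set]
    rw [if_neg (h m (by omega))]

theorem wrAux_getElem?_pos (matrix : List (List Int)) (K : List Int) :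
    ∀ (m : Nat) (B : List (List Int)), B.length = K.length → ∀ i, i < m → m ≤ K.length →
      (wrAux matrix K m B)[posn K i]? = some (matrix.getD i []) := by
  intro m
  induction m with
  | zero => intro B hB i hi hm; omega
  | succ m ih =>
    intro B hB i hi hm
    simp only [wrAux]
    rcases Nat.lt_or_ge i m with h | h
    · exact ih _ (by rw [PySem.List.pySetD_natCast, List.length_set]; exact hB) i h (by omega)
    · have him : i = m := by omega
      subst him
      rw [wrAux_getElem?_ne matrix K i _ _
        (fun i' hi' => posn_ne K i' i (by omega) (by omega) (by omega))]
      rw [PySem.List.pySetD_natCast, List.getElem?_set, if_pos rfl]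
      rw [if_pos (by rw [hB]; exact posn_lt K i (by omega))]

-- length of a run of buckets = number of rows whose key falls in the range
theorem buckets_len (g : List Int → Int) (matrix : List (List Int)) (a : Int) (j : Nat) :
    ((PySem.List.pyRange a (a + (j : Int)) 1).flatMap
        (fun v => matrix.filter (fun row => decide (g row = v)))).length
      = matrix.countP (fun row => decide (a ≤ g row ∧ g row < a + (j : Int))) := by
  induction j with
  | zero =>
    rw [show a + ((0 : Nat) : Int) = a by omega, PySem.List.pyRange_one_eq_nil (le_refl a)]
    simp only [List.flatMap_nil, List.length_nil]
    rw [eq_comm, List.countP_eq_zero]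
    intro x hx
    by_contra hcon
    simp at hcon
    omega
  | succ j ih =>
    rw [show a + ((j + 1 : Nat) : Int) = (a + (j : Int)) + 1 by omega]
    rw [PySem.List.pyRange_one_succ_right (by omega : a ≤ a + (j : Int))]
    rw [List.flatMap_append, List.length_append, ih]
    simp only [List.flatMap_cons, List.flatMap_nil, List.append_nil,
      ← List.countP_eq_length_filter]
    rw [eq_comm]
    apply countP_or_disjoint
    intro x _
    constructor
    · simp; omega
    · simp; omega

-- indexing into a filtered list at the count of earlier hits
theorem filter_getElem? {α : Type} (l : List α) (q : α → Bool) :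
    ∀ (i : Nat) (hi : i < l.length), q l[i] = true →
      (l.filter q)[(l.take i).countP q]? = some l[i] := by
  induction l with
  | nil => intro i hi; simp at hi
  | cons x t ih =>
    intro i hi hq
    cases i with
    | zero =>
      simp only [List.take_zero, List.countP_nil]
      simp only [List.getElem_cons_zero] at hq
      rw [List.filter_cons_of_pos hq]
      rfl
    | succ i =>
      simp only [List.getElem_cons_succ] at hq ⊢
      have ht := ih i (by simpa using Nat.lt_of_succ_lt_succ hi) hq
      rw [List.take_succ_cons, List.countP_cons]
      by_cases hx : q x = true
      · rw [List.filter_cons_of_pos hx]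
        simp [hx, ht]
      · rw [List.filter_cons_of_neg (by simpa using hx)]
        simp [hx, ht]

-- the sorted output reads row i at position posn K i
theorem buckets_getElem? (g : List Int → Int) (matrix : List (List Int)) (mx : Int)
    (hKb : ∀ row ∈ matrix, 0 ≤ g row ∧ g row < mx)
    (i : Nat) (hi : i < matrix.length) :
    (bucketsOf mx g matrix)[posn (matrix.map (g)) i]? = some matrix[i] := by
  have hiK : i < (matrix.map (g)).length := by simpa using hi
  have hKig : (matrix.map (g))[i] = g matrix[i] := by simp
  have hKi : (matrix.map (g)).getD i 0 = g matrix[i] := by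
    rw [List.getD_eq_getElem _ _ hiK, hKig]
  have hvb := hKb matrix[i] (List.getElem_mem hi)
  -- abbreviations, all as plain countP facts over matrix
  have hclt : clt (matrix.map (g)) (g matrix[i])
      = matrix.countP (fun row => decide (g row < g matrix[i])) := by
    rw [clt, List.countP_map]; rfl
  have hceqt : ceq ((matrix.map (g)).take i) (g matrix[i])
      = (matrix.take i).countP (fun row => decide (g row = g matrix[i])) := by
    rw [← List.map_take, ceq, List.countP_map]; rfl
  have hceq : ceq (matrix.map (g)) (g matrix[i])
      = matrix.countP (fun row => decide (g row = g matrix[i])) := by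
    rw [ceq, List.countP_map]; rfl
  have hpos : posn (matrix.map (g)) i
      = matrix.countP (fun row => decide (g row < g matrix[i]))
        + (matrix.take i).countP (fun row => decide (g row = g matrix[i])) := by
    rw [posn, hKi, hclt, hceqt]
  -- split the bucket list at bucket v
  have hsplit : PySem.List.pyRange 0 mx 1
      = PySem.List.pyRange 0 (g matrix[i]) 1
        ++ g matrix[i] :: PySem.List.pyRange (g matrix[i] + 1) mx 1 := by
    rw [PySem.List.pyRange_one_append 0 (g matrix[i]) mx hvb.1 (le_of_lt hvb.2),
      PySem.List.pyRange_one_cons hvb.2]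
  rw [bucketsOf, hsplit, List.flatMap_append, List.flatMap_cons]
  -- length of the part before bucket v
  have hlen : ((PySem.List.pyRange 0 (g matrix[i]) 1).flatMap
      (fun w => matrix.filter (fun row => decide (g row = w)))).length
      = matrix.countP (fun row => decide (g row < g matrix[i])) := by
    have hb := buckets_len g matrix 0 (g matrix[i]).toNat
    rw [show (0 : Int) + ((g matrix[i]).toNat : Int) = g matrix[i] by omega] at hb
    rw [hb]
    apply List.countP_congr
    intro row hrow
    have := hKb row hrow
    simp; omega
  -- the rank lies inside bucket v
  have hrank_lt : (matrix.take i).countP (fun row => decide (g row = g matrix[i]))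
      < (matrix.filter (fun row => decide (g row = g matrix[i]))).length := by
    rw [← List.countP_eq_length_filter, ← hceqt, ← hceq]
    have := ceq_take_lt (matrix.map (g)) i hiK
    rw [hKig] at this
    exact this
  rw [List.getElem?_append_right (by rw [hlen, hpos]; omega)]
  rw [hlen, hpos, Nat.add_sub_cancel_left]
  rw [List.getElem?_append_left hrank_lt]
  exact filter_getElem? matrix _ i hi (by simp)

-- total length of the buckets
theorem buckets_length (g : List Int → Int) (matrix : List (List Int)) (mx : Int) (hmx : 0 ≤ mx)
    (hKb : ∀ row ∈ matrix, 0 ≤ g row ∧ g row < mx) :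
    (bucketsOf mx g matrix).length = matrix.length := by
  have := buckets_len g matrix 0 mx.toNat
  rw [show (0 : Int) + (mx.toNat : Int) = mx by omega] at this
  rw [bucketsOf, this, List.countP_eq_length.mpr]
  intro row hrow
  have := hKb row hrow
  simp; omega


theorem rep_eq (m : Int) :
    List.replicate m.toNat (0 : Int) = (PySem.List.pyRange 0 m 1).map (fun _ => 0) := by
  rw [eq_comm, List.eq_replicate_iff]
  constructor
  · simp [PySem.List.length_pyRange_one]
  · intro b hb
    simp at hb
    exact hb.2

-- the written array equals the concatenated buckets
theorem wr_eq_buckets (matrix : List (List Int)) (g : List Int → Int) (k : Int) (hk : 0 ≤ k)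
    (hbk : ∀ x ∈ matrix.map (g), 0 ≤ x ∧ x < k + 1)
    (B0 : List (List Int)) (hB0 : B0.length = matrix.length) :
    wrAux matrix (matrix.map (g)) matrix.length B0 = bucketsOf (k + 1) g matrix := by
  have hrows : ∀ row ∈ matrix, 0 ≤ g row ∧ g row < k + 1 := by
    intro row hrow
    exact hbk (g row) (List.mem_map_of_mem hrow)
  have hlenL : (wrAux matrix (matrix.map (g)) matrix.length B0).length = matrix.length := by
    rw [wrAux_length, hB0]
  have hlenR : (bucketsOf (k + 1) g matrix).length = matrix.length :=
    buckets_length g matrix (k + 1) (by omega) hrows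
  apply List.ext_getElem?
  intro p
  by_cases hp : p < matrix.length
  · obtain ⟨i, hi, hpi⟩ := posn_surj (matrix.map (g)) p (by simpa using hp)
    have hiK : i < matrix.length := by simpa using hi
    rw [← hpi]
    rw [wrAux_getElem?_pos matrix (matrix.map (g)) matrix.length B0
      (by simpa using hB0) i (by simpa using hi) (by simp)]
    rw [buckets_getElem? g matrix (k + 1) hrows i hiK]
    rw [List.getD_eq_getElem _ _ hiK]
  · rw [List.getElem?_eq_none (by rw [hlenL]; omega),
      List.getElem?_eq_none (by rw [hlenR]; omega)]



-- B-side: the bucket fold maintains one filtered bucket per normalised key value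
theorem bside (r mx : Int) :
    ∀ (s p : List (List Int)), (∀ row ∈ s, -mx ≤ keyf r row ∧ keyf r row < mx) →
      s.foldl (fun bs row =>
          PySem.List.pySetD bs (PySem.List.pyGetD row r 0)
            (PySem.List.pyGetD bs (PySem.List.pyGetD row r 0) [] ++ [row]))
        ((PySem.List.pyRange 0 mx 1).map
          (fun v => p.filter (fun row => decide (wk mx (keyf r row) = v))))
      = (PySem.List.pyRange 0 mx 1).map
          (fun v => (p ++ s).filter (fun row => decide (wk mx (keyf r row) = v))) := by
  intro s
  induction s with
  | nil => intro p _; simp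
  | cons row t ih =>
    intro p hs
    have hrow := hs row (by simp)
    simp only [List.foldl_cons]
    rw [show PySem.List.pyGetD row r 0 = keyf r row from rfl]
    rw [getMapRangeWrap _ mx (keyf r row) [] hrow.1 hrow.2]
    rw [setMapRangeWrap _ mx (keyf r row) _ hrow.1 hrow.2]
    have hstep : (PySem.List.pyRange 0 mx 1).map
        (fun x => if x = wk mx (keyf r row)
            then p.filter (fun row' => decide (wk mx (keyf r row') = wk mx (keyf r row))) ++ [row]
            else p.filter (fun row' => decide (wk mx (keyf r row') = x)))
        = (PySem.List.pyRange 0 mx 1).map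
            (fun v => (p ++ [row]).filter (fun row' => decide (wk mx (keyf r row') = v))) := by
      apply List.map_congr_left
      intro x _
      rw [List.filter_append]
      by_cases h : x = wk mx (keyf r row)
      · rw [if_pos h, List.filter_cons, if_pos (by simp [h]), List.filter_nil, h]
      · rw [if_neg h, List.filter_cons, if_neg (by simp; exact fun hh => h hh.symm),
          List.filter_nil, List.append_nil]
    rw [hstep, ih (p ++ [row]) (fun x hx => hs x (by simp [hx]))]
    simp

theorem ports_eq (matrix : List (List Int)) (r : Int) (hne : matrix ≠ [])
    (hall : ∀ row ∈ matrix, PySem.Raise.InRange row.length r)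
    (hlow : ∀ row ∈ matrix, ∃ row' ∈ matrix, -(keyf r row' + 1) ≤ keyf r row) :
    counting_sort4mat matrix r = counting_sort4mat_alt matrix r := by
  -- both ports read the same key list
  have hA : (PySem.List.pyRange 0 (matrix.length : Int) 1).map
      (fun i => PySem.List.pyGetD (PySem.List.pyGetD matrix i []) r 0) = matrix.map (keyf r) := by
    have h1 := PySem.List.map_pyGetD_pyRange_zero' matrix []
    calc (PySem.List.pyRange 0 (matrix.length : Int) 1).map
          (fun i => PySem.List.pyGetD (PySem.List.pyGetD matrix i []) r 0)
        = ((PySem.List.pyRange 0 (matrix.length : Int) 1).map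
            (fun j => PySem.List.pyGetD matrix j [])).map (keyf r) := by
          rw [List.map_map]; rfl
      _ = matrix.map (keyf r) := by rw [h1]
  obtain ⟨k, hmax⟩ : ∃ k, PySem.List.max? (matrix.map (keyf r)) (fun x => x) = some k := by
    cases h : PySem.List.max? (matrix.map (keyf r)) (fun x => x) with
    | none => exact absurd ((PySem.List.max?_eq_none_iff _ _).mp h) (by simp [hne])
    | some m => exact ⟨m, rfl⟩
  have hub : ∀ x ∈ matrix.map (keyf r), x ≤ k := by
    intro x hx
    have := PySem.List.max?_isMax hmax x hx
    simpa using this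
  have hk0 : 0 ≤ k := by
    have hkm := PySem.List.max?_mem hmax
    obtain ⟨row, hrow, hxe⟩ := List.mem_map.mp hkm
    obtain ⟨row', hrow', hge⟩ := hlow row hrow
    have h1 : keyf r row' ≤ k := hub _ (List.mem_map_of_mem hrow')
    omega
  have hbnd : ∀ x ∈ matrix.map (keyf r), -(k + 1) ≤ x ∧ x < k + 1 := by
    intro x hx
    obtain ⟨row, hrow, hxe⟩ := List.mem_map.mp hx
    obtain ⟨row', hrow', hge⟩ := hlow row hrow
    have h1 : keyf r row' ≤ k := hub _ (List.mem_map_of_mem hrow')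
    have h2 := hub x hx
    omega
  have hbk' : ∀ x ∈ (matrix.map (keyf r)).map (wk (k + 1)), 0 ≤ x ∧ x < k + 1 := by
    intro x hx
    obtain ⟨y, hy, hxe⟩ := List.mem_map.mp hx
    have := hbnd y hy
    subst hxe
    rw [wk]
    split_ifs <;> omega
  have hrows : ∀ row ∈ matrix, -(k + 1) ≤ keyf r row ∧ keyf r row < k + 1 := fun row hrow =>
    hbnd (keyf r row) (List.mem_map_of_mem hrow)
  have hbkg : ∀ x ∈ matrix.map (fun row => wk (k + 1) (keyf r row)), 0 ≤ x ∧ x < k + 1 := by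
    intro x hx
    obtain ⟨row, hrow, hxe⟩ := List.mem_map.mp hx
    have := hrows row hrow
    subst hxe
    rw [wk]
    split_ifs <;> omega
  have hmax' : PySem.List.max? (matrix.map (fun row => PySem.List.pyGetD row r 0)) (fun x => x)
      = some k := hmax
  simp only [counting_sort4mat, counting_sort4mat_alt]
  rw [hA, hmax, hmax']
  -- A side: stage 1 (counting)
  rw [rep_eq (k + 1)]
  have e1 := PySem.List.foldl_pyRange_zero_pyGetD' (matrix.map (keyf r)) 0
    (fun C a => PySem.List.pySetD C a (PySem.List.pyGetD C a 0 + 1))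
    ((PySem.List.pyRange 0 (k + 1) 1).map (fun _ => (0 : Int)))
  rw [List.length_map] at e1
  rw [e1, stage1 (k + 1) (matrix.map (keyf r)) hbnd]
  -- A side: stage 2 (prefix sums)
  rw [stage2 ((matrix.map (keyf r)).map (wk (k + 1))) (k + 1) hbk' (k + 1) (by omega) (le_refl _)]
  have ecm : (PySem.List.pyRange 0 (k + 1) 1).map
      (fun v => if v < k + 1 then (cle ((matrix.map (keyf r)).map (wk (k + 1))) v : Int)
                else (ceq ((matrix.map (keyf r)).map (wk (k + 1))) v : Int))
      = cmState ((matrix.map (keyf r)).map (wk (k + 1))) (k + 1) matrix.length := by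
    rw [cmState]
    apply List.map_congr_left
    intro x hx
    rw [PySem.List.mem_pyRange_one] at hx
    rw [if_pos hx.2, List.take_of_length_le (by simp), List.drop_of_length_le (by simp)]
    simp [clt]
  rw [ecm]
  -- A side: stage 3 (placement)
  have e3 := stage3 matrix (matrix.map (keyf r)) (k + 1) hbnd (matrix.map (keyf r)).length
    (le_refl _) ((PySem.List.pyRange 0 (matrix.length : Int) 1).map
      (fun _ => (PySem.List.pyRange 0 ((PySem.List.pyGetD matrix 0 []).length : Int) 1).map
        (fun _ => (0 : Int))))
  rw [List.length_map] at e3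
  rw [e3]
  have hKg : (matrix.map (keyf r)).map (wk (k + 1))
      = matrix.map (fun row => wk (k + 1) (keyf r row)) := by
    rw [List.map_map]; rfl
  rw [hKg, wr_eq_buckets matrix (fun row => wk (k + 1) (keyf r row)) k hk0 (hKg ▸ hbk') _
    (by rw [List.length_map, PySem.List.length_pyRange_one]; omega)]
  -- B side: the bucket fold
  have einit : (PySem.List.pyRange 0 (k + 1) 1).map (fun _ => ([] : List (List Int)))
      = (PySem.List.pyRange 0 (k + 1) 1).map
          (fun v => ([] : List (List Int)).filter
            (fun row => decide (wk (k + 1) (keyf r row) = v))) := by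
    apply List.map_congr_left; intro x _; rfl
  rw [einit]
  have eb := bside r (k + 1) matrix [] hrows
  simp only [List.nil_append] at eb
  rw [eb, ← List.flatMap_def]
  rfl

-- ===== VERDICT (by name: the statement is the Claim_ definition above) =====
theorem counting_sort4mat_spec : Claim_equal_counting_sort4mat := by
  intro matrix r _ hpre
  exact ports_eq matrix r hpre.1 hpre.2.1 hpre.2.2
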